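-- pv_equiv track=rewrite | github.com/isidoravs/iic2233-2016-2 | Actividades/AC05/AC05.py | emparejar
-- ===== SOURCE A (Python) =====
-- def emparejar(grupo):
--     aux = list(enumerate(grupo))
--     par = list(filter(lambda x: x[0] % 2 == 0, aux))
--     impar = list(filter(lambda x: x[0] % 2 != 0, aux))
--     jugadores_par = [tupla[1] for tupla in par]
--     jugadores_impar = [tupla[1] for tupla in impar]
--     partidas = list(zip(jugadores_par, jugadores_impar))
--     return partidas
-- ===== SOURCE B (Python) =====
-- def emparejar(grupo):
--     pares = iter(grupo)
--     return list(zip(pares, pares))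
-- ===== Notes on version B (the rewrite author's own statement) =====
-- stated objective: idiomatic
-- what changed: Replaces A's enumerate/filter-even/filter-odd/zip pipeline by the standard idiom of zipping one iterator with itself, which pairs consecutive elements in a single pass.
import Mathlib
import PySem

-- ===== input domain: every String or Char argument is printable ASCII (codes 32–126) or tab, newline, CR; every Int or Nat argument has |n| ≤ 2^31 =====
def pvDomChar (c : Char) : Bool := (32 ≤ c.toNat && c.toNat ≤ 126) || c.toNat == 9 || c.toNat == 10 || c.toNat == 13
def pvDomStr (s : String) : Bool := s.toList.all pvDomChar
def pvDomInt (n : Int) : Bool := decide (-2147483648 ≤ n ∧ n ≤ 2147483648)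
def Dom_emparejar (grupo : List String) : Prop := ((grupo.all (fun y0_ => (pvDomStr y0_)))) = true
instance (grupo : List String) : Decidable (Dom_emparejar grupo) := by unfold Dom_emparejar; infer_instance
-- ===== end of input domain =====

-- B pairs consecutive elements in one pass by zipping an iterator with itself, instead of A's enumerate/filter/filter/zip pipeline (objective: idiomatic); the port of B transliterates that consecutive pairing as a two-step recursion.

-- ===== PORT A =====
def emparejar (grupo : List String) : List (String × String) :=
  let aux := PySem.List.enumerate grupo
  let par := aux.filter (fun x => PySem.Int.mod x.1 2 == 0)
  let impar := aux.filter (fun x => !(PySem.Int.mod x.1 2 == 0))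
  let jugadores_par := par.map (fun tupla => tupla.2)
  let jugadores_impar := impar.map (fun tupla => tupla.2)
  let partidas := List.zip jugadores_par jugadores_impar
  partidas

-- ===== PORT B =====
def emparejar_alt (grupo : List String) : List (String × String) :=
  match grupo with
  | a :: b :: rest => (a, b) :: emparejar_alt rest
  | _ => []

-- ===== PRECONDITION & SPEC =====
def Spec_emparejar (grupo : List String) (out : List (String × String)) : Prop := out = emparejar_alt grupo
instance (grupo : List String) (out : List (String × String)) : Decidable (Spec_emparejar grupo out) := by unfold Spec_emparejar; infer_instance

-- ===== CLAIM (what is proved, stated in full; the proofs are below) =====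
def Claim_equal_emparejar : Prop := ∀ (grupo : List String), Dom_emparejar grupo → Spec_emparejar grupo (emparejar grupo)

-- ===== LEMMAS AND PROOFS =====

-- elements at even (resp. odd) positions
mutual
def pvEvens : List String → List String
  | [] => []
  | a :: r => a :: pvOdds r
def pvOdds : List String → List String
  | [] => []
  | _ :: r => pvEvens r
end

theorem pv_mod_two_eq (x : Int) : PySem.Int.mod x 2 = x % 2 :=
  PySem.Int.mod_eq_emod_of_pos (by norm_num)

theorem pv_filter_enum (xs : List String) (n : Int) :
    (if n % 2 = 0 then
      ((PySem.List.enumerate xs n).filter (fun x => x.1 % 2 == 0)).map (fun t => t.2) = pvEvens xs ∧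
      ((PySem.List.enumerate xs n).filter (fun x => !(x.1 % 2 == 0))).map (fun t => t.2) = pvOdds xs
    else
      ((PySem.List.enumerate xs n).filter (fun x => x.1 % 2 == 0)).map (fun t => t.2) = pvOdds xs ∧
      ((PySem.List.enumerate xs n).filter (fun x => !(x.1 % 2 == 0))).map (fun t => t.2) = pvEvens xs) := by
  induction xs generalizing n with
  | nil => split <;> simp [PySem.List.enumerate_nil, pvEvens, pvOdds]
  | cons a r ih =>
    have hor : n % 2 = 0 ∨ n % 2 = 1 := by omega
    rcases hor with h | h
    · have h1 : ¬ (n + 1) % 2 = 0 := by omega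
      have hthis := ih (n + 1)
      rw [if_neg h1] at hthis
      rw [if_pos h]
      constructor
      · simp [PySem.List.enumerate_cons, h, pvEvens]
        exact hthis.1
      · simp [PySem.List.enumerate_cons, h, pvOdds]
        exact hthis.2
    · have h0 : (n + 1) % 2 = 0 := by omega
      have hthis := ih (n + 1)
      rw [if_pos h0] at hthis
      rw [if_neg (by omega)]
      constructor
      · simp [PySem.List.enumerate_cons, h, pvOdds]
        exact hthis.1
      · simp [PySem.List.enumerate_cons, h, pvEvens]
        exact hthis.2

theorem pv_zip_evens_odds (xs : List String) :
    List.zip (pvEvens xs) (pvOdds xs) = emparejar_alt xs := by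
  match xs with
  | [] => simp [pvEvens, pvOdds, emparejar_alt]
  | [a] => simp [pvEvens, pvOdds, emparejar_alt]
  | a :: b :: r =>
    simp only [pvEvens, pvOdds, List.zip_cons_cons, emparejar_alt]
    exact congrArg _ (pv_zip_evens_odds r)

-- ===== VERDICT (by name: the statement is the Claim_ definition above) =====
theorem emparejar_spec : Claim_equal_emparejar := by
  intro grupo _
  unfold Spec_emparejar emparejar
  simp only [pv_mod_two_eq]
  have h := pv_filter_enum grupo 0
  rw [if_pos (by decide)] at h
  rw [h.1, h.2, pv_zip_evens_odds]
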